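-- pv_equiv track=rewrite | github.com/JamesonW0/Chemical-Safety-Risk-Assessment-Generator | api/processGHSData.py | get_routes_and_measures
-- ===== SOURCE A (Python) =====
-- hazard_mappings = {
--     "spill": {200, 201, 202, 203, 204, 205, 206, 207, 208, 230, 231, 232, 250, 251, 300, 304, 310, 330, 340, 301, 311, 331},
--     "flame": {200, 201, 202, 203, 204, 205, 206, 207, 208, 220, 221, 222, 223, 224, 225, 226, 227, 228, 229, 230, 231, 232,
--               240, 241, 242, 251, 252, 270, 271, 272},
--     "Tcontrol": {200, 201, 202, 203, 204, 205, 206, 207, 208, 225, 226, 227, 228, 230, 231, 270, 271, 272, 280},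
--     "pregnant": {360, 361, 362},
--     "water": {261, 262},
--     "dropwise": {261, 262, 270, 271, 272},
--     "air": {230, 231, 232, 250},
-- }
--
-- exposure_mappings = {
--     "eye": {314, 318, 319},
--     "skin": {310, 311, 312, 314, 315, 317},
--     "inhalation": {304, 330, 331, 332, 334, 335, 336},
--     "ingestion": {300, 301, 302, 304},
-- }
--
-- def get_routes_and_measures(hazard_statements):
--     """
--     Process a newline-separated string of hazard codes (as text)
--     and return exposure routes (list of 4 ints) and control measures (list of 9 ints).
--     """
--     if not hazard_statements or hazard_statements[0] == "N":
--         return [0] * 4, [0] * 9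
--
--     hazard_codes = set()
--     for row in hazard_statements.splitlines():
--         try:
--             code = int(row.strip())
--         except Exception:
--             try:
--                 code = int(row[1:4])
--             except Exception:
--                 continue
--         hazard_codes.add(code)
--
--     exp_routes = [0] * 4
--     ctrl_measures = [1 if i == 2 else 0 for i in range(9)]
--
--     for key, hazard_set in hazard_mappings.items():
--         if hazard_codes & hazard_set:
--             index = {"spill": 0, "flame": 3, "Tcontrol": 4, "pregnant": 5,
--                      "water": 6, "dropwise": 7, "air": 8}.get(key)
--             if index is not None:
--                 ctrl_measures[index] = 1
--
--     for key, hazard_set in exposure_mappings.items():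
--         if hazard_codes & hazard_set:
--             index = {"eye": 0, "skin": 1, "inhalation": 2, "ingestion": 3}.get(key)
--             if index is not None:
--                 exp_routes[index] = 1
--
--     return exp_routes, ctrl_measures
-- ===== SOURCE B (Python) =====
-- # Single streaming pass over the rows: no hazard-code set is built and no
-- # per-category set intersections are taken; each parsed code directly switches
-- # on the flags of every category it belongs to (idempotent, so duplicates and
-- # ordering are irrelevant).
--
-- _CTRL_CATS = [
--     (0, {200, 201, 202, 203, 204, 205, 206, 207, 208, 230, 231, 232, 250, 251,
--          300, 304, 310, 330, 340, 301, 311, 331}),                      # spill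
--     (3, {200, 201, 202, 203, 204, 205, 206, 207, 208, 220, 221, 222, 223, 224,
--          225, 226, 227, 228, 229, 230, 231, 232, 240, 241, 242, 251, 252, 270,
--          271, 272}),                                                    # flame
--     (4, {200, 201, 202, 203, 204, 205, 206, 207, 208, 225, 226, 227, 228, 230,
--          231, 270, 271, 272, 280}),                                     # Tcontrol
--     (5, {360, 361, 362}),                                               # pregnant
--     (6, {261, 262}),                                                    # water
--     (7, {261, 262, 270, 271, 272}),                                     # dropwise
--     (8, {230, 231, 232, 250}),                                          # air
-- ]
--
-- _EXP_CATS = [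
--     (0, {314, 318, 319}),                                               # eye
--     (1, {310, 311, 312, 314, 315, 317}),                                # skin
--     (2, {304, 330, 331, 332, 334, 335, 336}),                           # inhalation
--     (3, {300, 301, 302, 304}),                                          # ingestion
-- ]
--
--
-- def _parse_code(row):
--     try:
--         return int(row.strip())
--     except Exception:
--         try:
--             return int(row[1:4])
--         except Exception:
--             return None
--
--
-- def get_routes_and_measures(hazard_statements):
--     if not hazard_statements or hazard_statements[0] == "N":
--         return [0] * 4, [0] * 9
--
--     exp_routes = [0] * 4
--     ctrl_measures = [0, 0, 1, 0, 0, 0, 0, 0, 0]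
--     for row in hazard_statements.splitlines():
--         code = _parse_code(row)
--         if code is None:
--             continue
--         for i, codes in _CTRL_CATS:
--             if code in codes:
--                 ctrl_measures[i] = 1
--         for i, codes in _EXP_CATS:
--             if code in codes:
--                 exp_routes[i] = 1
--     return exp_routes, ctrl_measures
-- ===== Notes on version B (the rewrite author's own statement) =====
-- stated objective: alternative
-- what changed: B streams the rows in a single pass, flipping the category flags directly per parsed code, instead of A's two-phase scheme that first collects a set of codes and then intersects it with each category set.
import Mathlib
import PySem

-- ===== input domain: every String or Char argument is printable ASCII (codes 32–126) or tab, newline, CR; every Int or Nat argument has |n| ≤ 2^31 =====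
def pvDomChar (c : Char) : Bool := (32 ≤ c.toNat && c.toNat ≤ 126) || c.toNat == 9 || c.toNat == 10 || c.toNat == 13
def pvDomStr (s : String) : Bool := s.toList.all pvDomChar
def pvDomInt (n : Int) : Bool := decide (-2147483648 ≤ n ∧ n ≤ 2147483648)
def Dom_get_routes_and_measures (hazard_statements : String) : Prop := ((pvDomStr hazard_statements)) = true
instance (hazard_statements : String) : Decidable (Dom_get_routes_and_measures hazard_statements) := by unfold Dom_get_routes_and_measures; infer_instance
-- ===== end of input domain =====

-- B replaces A's two-phase scheme (collect a set of codes, then intersect it with each category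
-- set) by a single streaming pass over the rows that flips category flags per parsed code.

-- ===== PORT A =====
-- shared GHS data tables (module-level constants in both Pythons)
def pvSpill : List Int := [200, 201, 202, 203, 204, 205, 206, 207, 208, 230, 231, 232, 250, 251, 300, 304, 310, 330, 340, 301, 311, 331]
def pvFlame : List Int := [200, 201, 202, 203, 204, 205, 206, 207, 208, 220, 221, 222, 223, 224, 225, 226, 227, 228, 229, 230, 231, 232, 240, 241, 242, 251, 252, 270, 271, 272]
def pvTcontrol : List Int := [200, 201, 202, 203, 204, 205, 206, 207, 208, 225, 226, 227, 228, 230, 231, 270, 271, 272, 280]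
def pvPregnant : List Int := [360, 361, 362]
def pvWater : List Int := [261, 262]
def pvDropwise : List Int := [261, 262, 270, 271, 272]
def pvAir : List Int := [230, 231, 232, 250]
def pvEye : List Int := [314, 318, 319]
def pvSkin : List Int := [310, 311, 312, 314, 315, 317]
def pvInhalation : List Int := [304, 330, 331, 332, 334, 335, 336]
def pvIngestion : List Int := [300, 301, 302, 304]

def pvHazardMappings : List (String × List Int) :=
  [("spill", pvSpill), ("flame", pvFlame), ("Tcontrol", pvTcontrol), ("pregnant", pvPregnant),
   ("water", pvWater), ("dropwise", pvDropwise), ("air", pvAir)]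
def pvExposureMappings : List (String × List Int) :=
  [("eye", pvEye), ("skin", pvSkin), ("inhalation", pvInhalation), ("ingestion", pvIngestion)]

-- the literal index dicts' .get(key), ported as a match (exact: total literal dict lookup)
def pvCtrlIndex : String → Option Nat
  | "spill" => some 0 | "flame" => some 3 | "Tcontrol" => some 4 | "pregnant" => some 5
  | "water" => some 6 | "dropwise" => some 7 | "air" => some 8 | _ => none
def pvExpIndex : String → Option Nat
  | "eye" => some 0 | "skin" => some 1 | "inhalation" => some 2 | "ingestion" => some 3 | _ => none

def get_routes_and_measures (hazard_statements : String) : List Int × List Int :=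
  if hazard_statements.toList.isEmpty || (PySem.Str.pyGet? hazard_statements 0 == some 'N') then
    (List.replicate 4 0, List.replicate 9 0)
  else
    -- hazard_codes built by the try/int(row.strip()) / int(row[1:4]) / continue loop
    let hazard_codes : PySem.Set Int :=
      (PySem.Str.splitlines hazard_statements).foldl (fun hc row =>
        match PySem.Int.ofStr? (PySem.Str.strip row) with
        | some code => PySem.Set.add hc code
        | none =>
          match PySem.Int.ofStr? (PySem.Str.slice row (some 1) (some 4)) with
          | some code => PySem.Set.add hc code
          | none => hc) PySem.Set.empty
    -- `hazard_codes & hazard_set` truthiness ported as "some element of the set is in the category" (exact)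
    let ctrl_measures :=
      pvHazardMappings.foldl (fun cm kv =>
        if hazard_codes.any (fun c => kv.2.contains c) then
          match pvCtrlIndex kv.1 with
          | some i => cm.set i 1
          | none => cm
        else cm)
        ((PySem.List.pyRange 0 9 1).map (fun i => if i == 2 then (1 : Int) else 0))
    let exp_routes :=
      pvExposureMappings.foldl (fun er kv =>
        if hazard_codes.any (fun c => kv.2.contains c) then
          match pvExpIndex kv.1 with
          | some i => er.set i 1
          | none => er
        else er)
        (List.replicate 4 0)
    (exp_routes, ctrl_measures)

-- ===== PORT B =====
def pvCtrlCats : List (Nat × List Int) :=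
  [(0, pvSpill), (3, pvFlame), (4, pvTcontrol), (5, pvPregnant), (6, pvWater), (7, pvDropwise), (8, pvAir)]
def pvExpCats : List (Nat × List Int) :=
  [(0, pvEye), (1, pvSkin), (2, pvInhalation), (3, pvIngestion)]

def pvParseCode (row : String) : Option Int :=
  match PySem.Int.ofStr? (PySem.Str.strip row) with
  | some code => some code
  | none => PySem.Int.ofStr? (PySem.Str.slice row (some 1) (some 4))

def get_routes_and_measures_alt (hazard_statements : String) : List Int × List Int :=
  if hazard_statements.toList.isEmpty || (PySem.Str.pyGet? hazard_statements 0 == some 'N') then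
    (List.replicate 4 0, List.replicate 9 0)
  else
    (PySem.Str.splitlines hazard_statements).foldl (fun st row =>
      match pvParseCode row with
      | none => st
      | some code =>
        let cm := pvCtrlCats.foldl (fun cm ic => if ic.2.contains code then cm.set ic.1 1 else cm) st.2
        let er := pvExpCats.foldl (fun er ic => if ic.2.contains code then er.set ic.1 1 else er) st.1
        (er, cm))
      ([0, 0, 0, 0], [0, 0, 1, 0, 0, 0, 0, 0, 0])

-- ===== PRECONDITION & SPEC =====
def Spec_get_routes_and_measures (hazard_statements : String) (out : List Int × List Int) : Prop := out = get_routes_and_measures_alt hazard_statements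
instance (hazard_statements : String) (out : List Int × List Int) : Decidable (Spec_get_routes_and_measures hazard_statements out) := by unfold Spec_get_routes_and_measures; infer_instance

-- ===== CLAIM (what is proved, stated in full; the proofs are below) =====
def Claim_equal_get_routes_and_measures : Prop := ∀ (hazard_statements : String), Dom_get_routes_and_measures hazard_statements → Spec_get_routes_and_measures hazard_statements (get_routes_and_measures hazard_statements)

-- ===== LEMMAS AND PROOFS =====

-- "some row parses to a code satisfying p"
def pvHit (p : Int → Bool) (rows : List String) : Bool :=
  rows.any (fun r => match pvParseCode r with | some c => p c | none => false)

-- flag update: 1 if the category was hit, else unchanged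
def pvG (b : Bool) (x : Int) : Int := if b then 1 else x

theorem pvG_pvG (b h : Bool) (x : Int) : pvG h (pvG b x) = pvG (b || h) x := by
  cases b <;> cases h <;> simp [pvG]

theorem pv_any_add (s : PySem.Set Int) (c : Int) (p : Int → Bool) :
    (PySem.Set.add s c).any p = (s.any p || p c) := by
  by_cases h : c ∈ s
  · cases hp : p c
    · simp [PySem.Set.add, h]
    · have ha : s.any p = true := List.any_eq_true.mpr ⟨c, h, hp⟩
      simp [PySem.Set.add, h, ha]
  · simp [PySem.Set.add, h]

-- A's parsing step is pvParseCode followed by Set.add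
theorem pv_astep_eq (hc : PySem.Set Int) (row : String) :
    (match PySem.Int.ofStr? (PySem.Str.strip row) with
     | some code => PySem.Set.add hc code
     | none =>
       match PySem.Int.ofStr? (PySem.Str.slice row (some 1) (some 4)) with
       | some code => PySem.Set.add hc code
       | none => hc)
    = match pvParseCode row with
      | some c => PySem.Set.add hc c
      | none => hc := by
  unfold pvParseCode
  cases h1 : PySem.Int.ofStr? (PySem.Str.strip row) <;>
    cases h2 : PySem.Int.ofStr? (PySem.Str.slice row (some 1) (some 4)) <;> simp

theorem pv_codes_any (rows : List String) (p : Int → Bool) : ∀ (s : PySem.Set Int),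
    ((rows.foldl (fun hc row =>
        match PySem.Int.ofStr? (PySem.Str.strip row) with
        | some code => PySem.Set.add hc code
        | none =>
          match PySem.Int.ofStr? (PySem.Str.slice row (some 1) (some 4)) with
          | some code => PySem.Set.add hc code
          | none => hc) s).any p)
    = (s.any p || pvHit p rows) := by
  induction rows with
  | nil => intro s; simp [pvHit]
  | cons r rest ih =>
    intro s
    rw [List.foldl_cons, pv_astep_eq]
    cases h : pvParseCode r with
    | none => simp [pvHit, h, ih]
    | some c => simp [pvHit, h, ih, pv_any_add, Bool.or_assoc]

-- A's category folds, characterised entrywise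
set_option maxHeartbeats 2000000 in
theorem pv_aCtrl (S : PySem.Set Int) (c0 c1 c2 c3 c4 c5 c6 c7 c8 : Int) :
    pvHazardMappings.foldl (fun cm kv =>
        if S.any (fun c => kv.2.contains c) then
          match pvCtrlIndex kv.1 with
          | some i => cm.set i 1
          | none => cm
        else cm) [c0, c1, c2, c3, c4, c5, c6, c7, c8]
    = [pvG (S.any (fun c => pvSpill.contains c)) c0, c1, c2,
       pvG (S.any (fun c => pvFlame.contains c)) c3,
       pvG (S.any (fun c => pvTcontrol.contains c)) c4,
       pvG (S.any (fun c => pvPregnant.contains c)) c5,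
       pvG (S.any (fun c => pvWater.contains c)) c6,
       pvG (S.any (fun c => pvDropwise.contains c)) c7,
       pvG (S.any (fun c => pvAir.contains c)) c8] := by
  simp only [pvHazardMappings, List.foldl_cons, List.foldl_nil, pvCtrlIndex, pvG]
  split_ifs <;> rfl

set_option maxHeartbeats 2000000 in
theorem pv_aExp (S : PySem.Set Int) (e0 e1 e2 e3 : Int) :
    pvExposureMappings.foldl (fun er kv =>
        if S.any (fun c => kv.2.contains c) then
          match pvExpIndex kv.1 with
          | some i => er.set i 1
          | none => er
        else er) [e0, e1, e2, e3]
    = [pvG (S.any (fun c => pvEye.contains c)) e0,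
       pvG (S.any (fun c => pvSkin.contains c)) e1,
       pvG (S.any (fun c => pvInhalation.contains c)) e2,
       pvG (S.any (fun c => pvIngestion.contains c)) e3] := by
  simp only [pvExposureMappings, List.foldl_cons, List.foldl_nil, pvExpIndex, pvG]
  split_ifs <;> rfl

-- B's per-row inner folds, characterised entrywise
set_option maxHeartbeats 2000000 in
theorem pv_bCtrlRow (code : Int) (c0 c1 c2 c3 c4 c5 c6 c7 c8 : Int) :
    pvCtrlCats.foldl (fun cm ic => if ic.2.contains code then cm.set ic.1 1 else cm)
      [c0, c1, c2, c3, c4, c5, c6, c7, c8]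
    = [pvG (pvSpill.contains code) c0, c1, c2, pvG (pvFlame.contains code) c3,
       pvG (pvTcontrol.contains code) c4, pvG (pvPregnant.contains code) c5,
       pvG (pvWater.contains code) c6, pvG (pvDropwise.contains code) c7,
       pvG (pvAir.contains code) c8] := by
  simp only [pvCtrlCats, List.foldl_cons, List.foldl_nil, pvG]
  split_ifs <;> rfl

set_option maxHeartbeats 2000000 in
theorem pv_bExpRow (code : Int) (e0 e1 e2 e3 : Int) :
    pvExpCats.foldl (fun er ic => if ic.2.contains code then er.set ic.1 1 else er)
      [e0, e1, e2, e3]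
    = [pvG (pvEye.contains code) e0, pvG (pvSkin.contains code) e1,
       pvG (pvInhalation.contains code) e2, pvG (pvIngestion.contains code) e3] := by
  simp only [pvExpCats, List.foldl_cons, List.foldl_nil, pvG]
  split_ifs <;> rfl

-- B's streaming loop, characterised entrywise
set_option maxHeartbeats 2000000 in
theorem pv_bfold (rows : List String) : ∀ (e0 e1 e2 e3 c0 c1 c2 c3 c4 c5 c6 c7 c8 : Int),
    (rows.foldl (fun st row =>
      match pvParseCode row with
      | none => st
      | some code =>
        let cm := pvCtrlCats.foldl (fun cm ic => if ic.2.contains code then cm.set ic.1 1 else cm) st.2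
        let er := pvExpCats.foldl (fun er ic => if ic.2.contains code then er.set ic.1 1 else er) st.1
        (er, cm))
      ([e0, e1, e2, e3], [c0, c1, c2, c3, c4, c5, c6, c7, c8]))
    = ([pvG (pvHit (fun c => pvEye.contains c) rows) e0,
        pvG (pvHit (fun c => pvSkin.contains c) rows) e1,
        pvG (pvHit (fun c => pvInhalation.contains c) rows) e2,
        pvG (pvHit (fun c => pvIngestion.contains c) rows) e3],
       [pvG (pvHit (fun c => pvSpill.contains c) rows) c0, c1, c2,
        pvG (pvHit (fun c => pvFlame.contains c) rows) c3,
        pvG (pvHit (fun c => pvTcontrol.contains c) rows) c4,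
        pvG (pvHit (fun c => pvPregnant.contains c) rows) c5,
        pvG (pvHit (fun c => pvWater.contains c) rows) c6,
        pvG (pvHit (fun c => pvDropwise.contains c) rows) c7,
        pvG (pvHit (fun c => pvAir.contains c) rows) c8]) := by
  induction rows with
  | nil => intro e0 e1 e2 e3 c0 c1 c2 c3 c4 c5 c6 c7 c8; simp [pvHit, pvG]
  | cons r rest ih =>
    intro e0 e1 e2 e3 c0 c1 c2 c3 c4 c5 c6 c7 c8
    rw [List.foldl_cons]
    cases h : pvParseCode r with
    | none => rw [ih]; simp [pvHit, h]
    | some code =>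
      simp only [pv_bCtrlRow, pv_bExpRow]
      rw [ih]
      simp only [pvG_pvG]
      simp [pvHit, h]

-- ===== VERDICT (by name: the statement is the Claim_ definition above) =====
set_option maxHeartbeats 4000000 in
theorem get_routes_and_measures_spec : Claim_equal_get_routes_and_measures := by
  intro s _
  unfold Spec_get_routes_and_measures get_routes_and_measures get_routes_and_measures_alt
  cases hg : (s.toList.isEmpty || (PySem.Str.pyGet? s 0 == some 'N'))
  · have hstart : ((PySem.List.pyRange 0 9 1).map (fun i => if i == 2 then (1 : Int) else 0))
        = [0, 0, 1, 0, 0, 0, 0, 0, 0] := by decide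
    have hrep4 : (List.replicate 4 (0 : Int)) = [0, 0, 0, 0] := by decide
    simp only [Bool.false_eq_true, if_false, hstart, hrep4]
    simp only [pv_aCtrl, pv_aExp, pv_bfold]
    simp only [pv_codes_any]
    simp [PySem.Set.empty]
  · simp only [if_true]
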